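-- pv_equiv track=rewrite | github.com/Archer4444/code_bot_tg | tg_bot_python_ai.py | format_code_blocks
-- ===== SOURCE A (Python) =====
-- def format_code_blocks(text):
--     lines = text.splitlines()
--     formatted_text = []
--     in_code_block = False
--
--     for line in lines:
--         if "```" in line:
--             in_code_block = not in_code_block
--         formatted_text.append(line)
--
--     # Закрываем открытый блок, если он остался
--     if in_code_block:
--         formatted_text.append("```")
--
--     return "\n".join(formatted_text)
-- ===== SOURCE B (Python) =====
-- def _drop_through_fence(lines):
--     """Return the suffix of lines strictly after the first fence line, or None if no fence."""
--     for i, line in enumerate(lines):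
--         if "```" in line:
--             return lines[i + 1:]
--     return None
--
--
-- def _unmatched(lines):
--     """Consume fence lines in opener/closer pairs; True iff an opener has no closer."""
--     while True:
--         rest1 = _drop_through_fence(lines)
--         if rest1 is None:
--             return False
--         rest2 = _drop_through_fence(rest1)
--         if rest2 is None:
--             return True
--         lines = rest2
--
--
-- def format_code_blocks(text):
--     lines = text.splitlines()
--     if _unmatched(lines):
--         lines = lines + ["```"]
--     return "\n".join(lines)
-- ===== Notes on version B (the rewrite author's own statement) =====
-- stated objective: alternative
-- what changed: Instead of A's single pass that toggles an in_code_block flag while rebuilding the line list, B leaves the lines untouched and decides the closing fence by a pairing scan: a helper repeatedly drops everything through the next fence line, consuming fences in opener/closer pairs, and reports an unmatched opener.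
import Mathlib
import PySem

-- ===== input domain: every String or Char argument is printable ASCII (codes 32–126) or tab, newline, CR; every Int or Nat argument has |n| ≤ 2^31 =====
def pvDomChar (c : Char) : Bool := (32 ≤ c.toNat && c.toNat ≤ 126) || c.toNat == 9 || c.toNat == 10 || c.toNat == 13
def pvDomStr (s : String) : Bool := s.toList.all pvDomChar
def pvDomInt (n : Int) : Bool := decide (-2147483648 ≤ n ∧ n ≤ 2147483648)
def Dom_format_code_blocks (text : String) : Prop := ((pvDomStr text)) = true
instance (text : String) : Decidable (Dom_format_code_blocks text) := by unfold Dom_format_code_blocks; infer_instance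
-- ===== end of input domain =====

-- B decides the closing fence by pairing fence lines (drop-through-next-fence, consumed two at a time)
-- instead of A's toggle-flag pass that rebuilds the line list (alternative decomposition; same cost).

-- ===== PORT A =====
def format_code_blocks (text : String) : String :=
  let lines := PySem.Str.splitlines text
  let st := lines.foldl
    (fun (s : List String × Bool) line =>
      let b := if PySem.Str.isIn "```" line then !s.2 else s.2
      (s.1 ++ [line], b))
    ([], false)
  let formatted := if st.2 then st.1 ++ ["```"] else st.1
  PySem.Str.join "\n" formatted

-- ===== PORT B =====
-- suffix of lines strictly after the first fence line, or none if no fence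
def dropThroughFence : List String → Option (List String)
  | [] => none
  | l :: rest => if PySem.Str.isIn "```" l then some rest else dropThroughFence rest

theorem dropThroughFence_length {xs r : List String} (h : dropThroughFence xs = some r) :
    r.length < xs.length := by
  induction xs with
  | nil => simp [dropThroughFence] at h
  | cons l rest ih =>
    simp only [dropThroughFence] at h
    split at h
    · cases h; simp
    · exact Nat.lt_trans (ih h) (by simp)

-- consume fence lines in opener/closer pairs; true iff an opener has no closer
def unmatchedFences (lines : List String) : Bool :=
  match h1 : dropThroughFence lines with
  | none => false
  | some r1 =>
    match h2 : dropThroughFence r1 with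
    | none => true
    | some r2 => unmatchedFences r2
termination_by lines.length
decreasing_by
  exact Nat.lt_trans (dropThroughFence_length h2) (dropThroughFence_length h1)

def format_code_blocks_alt (text : String) : String :=
  let lines := PySem.Str.splitlines text
  let lines' := if unmatchedFences lines then lines ++ ["```"] else lines
  PySem.Str.join "\n" lines'

-- ===== PRECONDITION & SPEC =====
def Spec_format_code_blocks (text : String) (out : String) : Prop := out = format_code_blocks_alt text
instance (text : String) (out : String) : Decidable (Spec_format_code_blocks text out) := by unfold Spec_format_code_blocks; infer_instance

-- ===== CLAIM (what is proved, stated in full; the proofs are below) =====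
def Claim_equal_format_code_blocks : Prop := ∀ (text : String), Dom_format_code_blocks text → Spec_format_code_blocks text (format_code_blocks text)

-- ===== LEMMAS AND PROOFS =====

theorem pv_parity_succ (c : Nat) : ((c + 1) % 2 == 1) = !(c % 2 == 1) := by
  rcases Nat.mod_two_eq_zero_or_one c with h | h <;> simp [Nat.add_mod, h]

-- A's fold computes the appended lines and the parity of fence lines
theorem pv_fold_eq (p : String → Bool) (lines : List String) :
    ∀ (acc : List String) (b : Bool),
      lines.foldl
        (fun (s : List String × Bool) line =>
          let b' := if p line then !s.2 else s.2
          (s.1 ++ [line], b'))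
        (acc, b)
      = (acc ++ lines, xor b (lines.countP p % 2 == 1)) := by
  induction lines with
  | nil => intro acc b; simp
  | cons l rest ih =>
    intro acc b
    simp only [List.foldl_cons, List.countP_cons]
    by_cases hp : p l
    · rw [ih]; simp [hp, pv_parity_succ]
    · rw [ih]; simp [hp]

-- dropThroughFence = none exactly when no fence line exists
theorem pv_dtf_none {xs : List String} (h : dropThroughFence xs = none) :
    xs.countP (fun l => PySem.Str.isIn "```" l) = 0 := by
  induction xs with
  | nil => simp
  | cons l rest ih =>
    simp only [dropThroughFence] at h
    split at h
    · cases h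
    · simp_all [List.countP_cons]

-- dropThroughFence consumes exactly one fence line
theorem pv_dtf_some {xs r : List String} (h : dropThroughFence xs = some r) :
    xs.countP (fun l => PySem.Str.isIn "```" l)
      = r.countP (fun l => PySem.Str.isIn "```" l) + 1 := by
  induction xs with
  | nil => simp [dropThroughFence] at h
  | cons l rest ih =>
    simp only [dropThroughFence] at h
    split at h
    · cases h; simp_all [List.countP_cons]
    · simp_all [List.countP_cons]

theorem pv_parity_two (c : Nat) : ((c + 1 + 1) % 2 == 1) = (c % 2 == 1) := by
  rcases Nat.mod_two_eq_zero_or_one c with h | h <;> simp [Nat.add_mod, h]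

-- the pairing scan is true iff the number of fence lines is odd
theorem pv_unmatched_eq_parity (lines : List String) :
    unmatchedFences lines = (lines.countP (fun l => PySem.Str.isIn "```" l) % 2 == 1) := by
  induction hn : lines.length using Nat.strong_induction_on generalizing lines with
  | _ n ih =>
    rw [unmatchedFences]
    split
    next h1 => rw [pv_dtf_none h1]; decide
    next r1 h1 =>
      split
      next h2 => rw [pv_dtf_some h1, pv_dtf_none h2]; decide
      next r2 h2 =>
        have hlt : r2.length < n := by
          subst hn
          exact Nat.lt_trans (dropThroughFence_length h2) (dropThroughFence_length h1)
        rw [ih r2.length hlt r2 rfl, pv_dtf_some h1, pv_dtf_some h2, pv_parity_two]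

-- ===== VERDICT (by name: the statement is the Claim_ definition above) =====
theorem format_code_blocks_spec : Claim_equal_format_code_blocks := by
  intro text _
  unfold Spec_format_code_blocks format_code_blocks format_code_blocks_alt
  simp only [pv_fold_eq (fun line => PySem.Str.isIn "```" line) (PySem.Str.splitlines text) [] false,
    pv_unmatched_eq_parity]
  simp
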